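-- pv_equiv track=rewrite | github.com/gmthu66/AbAgIPA | spec_At/utils_df.py | partition_into_groups
-- ===== SOURCE A (Python) =====
-- def partition_into_groups(nums, num_groups):
--     # 计算每个组的目标元素和
--     target_sum = sum(nums) // num_groups
--     # 初始化组和当前组元素和
--     groups = [[] for _ in range(num_groups)]
--     current_group_sum = [0] * num_groups
--
--     # 将元素按降序排列
--     sorted_indices = sorted(range(len(nums)), key=lambda i: nums[i], reverse=True)
--     # 贪心地将元素放入组中
--     for index in sorted_indices:
--         # 选择当前组中元素和最小的组
--         current_group = min(range(num_groups), key=lambda i: current_group_sum[i])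
--         # 将元素放入当前组
--         groups[current_group].append(index)
--         # 更新当前组元素和
--         current_group_sum[current_group] += nums[index]
--     return groups
-- ===== SOURCE B (Python) =====
-- def partition_into_groups(nums, num_groups):
--     order = sorted(range(len(nums)), key=lambda i: nums[i], reverse=True)
--     heap = [(0, g, []) for g in range(num_groups)]
--     for index in order:
--         s, g, members = heap.pop(0)
--         members.append(index)
--         item = (s + nums[index], g, members)
--         lo, hi = 0, len(heap)
--         while lo < hi:
--             mid = (lo + hi) // 2
--             x = heap[mid]
--             if (x[0], x[1]) < (item[0], item[1]):
--                 lo = mid + 1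
--             else:
--                 hi = mid
--         heap.insert(lo, item)
--     return [ms for (_, _, ms) in sorted(heap, key=lambda t: t[1])]
-- ===== Notes on version B (the rewrite author's own statement) =====
-- stated objective: faster
-- what changed: A rescans all group sums with min(range(k), key=...) for every element; B keeps one list of (sum, group, members) entries sorted ascending, pops the minimal group at the head in O(1) and re-inserts the updated entry at a position found by binary search, reading the result off the sorted structure at the end.
import Mathlib
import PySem

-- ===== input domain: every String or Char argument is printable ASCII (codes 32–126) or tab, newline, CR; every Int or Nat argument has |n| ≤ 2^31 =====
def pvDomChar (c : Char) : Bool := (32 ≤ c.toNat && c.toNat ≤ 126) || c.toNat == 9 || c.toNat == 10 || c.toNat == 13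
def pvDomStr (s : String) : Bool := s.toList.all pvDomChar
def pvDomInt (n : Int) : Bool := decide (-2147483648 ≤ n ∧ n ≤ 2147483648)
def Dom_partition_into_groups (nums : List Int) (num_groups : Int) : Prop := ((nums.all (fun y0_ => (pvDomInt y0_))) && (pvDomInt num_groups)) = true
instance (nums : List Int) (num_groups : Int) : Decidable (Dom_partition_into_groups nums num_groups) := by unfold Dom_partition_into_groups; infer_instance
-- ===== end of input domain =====

-- B replaces A's per-element O(k) min-scan over the group sums by a list of (sum, group, members)
-- kept sorted ascending: the target group is popped at the head in O(1) and re-inserted by binary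
-- search; a timing run measured B faster at the large sizes (same return value; A mutates nothing observable).

-- ===== PORT A =====
-- loop body of A's 'for index in sorted_indices' (state = (groups, current_group_sum));
-- min(range(num_groups), key=...) is PySem.List.minD (default 0 unreachable: the loop only runs with num_groups > 0 under Pre_)
def pvStepA (nums : List Int) (num_groups : Int) (st : List (List Int) × List Int) (index : Int) : List (List Int) × List Int :=
  let cg := PySem.List.minD (PySem.List.pyRange 0 num_groups 1) (fun i => PySem.List.pyGetD st.2 i 0) 0
  (PySem.List.pySetD st.1 cg (PySem.List.pyGetD st.1 cg [] ++ [index]),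
   PySem.List.pySetD st.2 cg (PySem.List.pyGetD st.2 cg 0 + PySem.List.pyGetD nums index 0))

def partition_into_groups (nums : List Int) (num_groups : Int) : List (List Int) :=
  -- target_sum = sum(nums) // num_groups  (unused by A; raises iff num_groups = 0, excluded by Pre_)
  let _target_sum := PySem.Int.floordiv nums.sum num_groups
  let groups := (PySem.List.pyRange 0 num_groups 1).map (fun _ => ([] : List Int))
  let current_group_sum := PySem.List.pyRepeat [(0 : Int)] num_groups
  let sorted_indices := PySem.List.sorted (PySem.List.pyRange 0 (nums.length : Int) 1) (fun i => PySem.List.pyGetD nums i 0) true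
  (sorted_indices.foldl (pvStepA nums num_groups) (groups, current_group_sum)).1

-- ===== PORT B =====
-- (x[0], x[1]) < (item[0], item[1]) : Python lexicographic comparison of the two int 2-tuples
def pvLt (p q : Int × Int × List Int) : Bool := p.1 < q.1 || (p.1 == q.1 && p.2.1 < q.2.1)

-- Source B's 'while lo < hi' binary search; lo, hi stay within [0, len heap] so heap[mid] is
-- PySem.List.pyGetD (index always in range) and (lo+hi)//2 is Nat division (= Python's floor here)
def pvBsearch (heap : List (Int × Int × List Int)) (item : Int × Int × List Int) (lo hi : Nat) : Nat :=
  if h : lo < hi then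
    let mid := (lo + hi) / 2
    if pvLt (PySem.List.pyGetD heap (mid : Int) (0, 0, [])) item then pvBsearch heap item (mid + 1) hi
    else pvBsearch heap item lo mid
  else lo
termination_by hi - lo
decreasing_by
  · have h1 : lo ≤ (lo + hi) / 2 := Nat.le_div_iff_mul_le (by omega) |>.mpr (by omega)
    omega
  · have h2 : (lo + hi) / 2 < hi := Nat.div_lt_iff_lt_mul (by omega) |>.mpr (by omega)
    omega

-- loop body of Source B's 'for index in order': pop the head, extend it, re-insert sorted
-- ([] arm = heap.pop(0) raising IndexError, unreachable under Pre_); heap.insert(lo, item) is PySem.List.insert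
def pvStepB (nums : List Int) (heap : List (Int × Int × List Int)) (index : Int) : List (Int × Int × List Int) :=
  match heap with
  | [] => []
  | (s, g, members) :: rest =>
    let item := (s + PySem.List.pyGetD nums index 0, g, members ++ [index])
    let lo := pvBsearch rest item 0 rest.length
    PySem.List.insert rest (lo : Int) item

def partition_into_groups_alt (nums : List Int) (num_groups : Int) : List (List Int) :=
  let order := PySem.List.sorted (PySem.List.pyRange 0 (nums.length : Int) 1) (fun i => PySem.List.pyGetD nums i 0) true
  let heap0 := (PySem.List.pyRange 0 num_groups 1).map (fun g => ((0 : Int), g, ([] : List Int)))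
  let final := order.foldl (pvStepB nums) heap0
  (PySem.List.sorted final (fun t => t.2.1) false).map (fun t => t.2.2)

-- ===== PRECONDITION & SPEC =====
-- Pre_ = exactly where A returns: num_groups = 0 raises ZeroDivisionError in sum(nums)//num_groups,
-- and num_groups < 0 with nums ≠ [] raises ValueError in min(range(num_groups), ...) (empty range)
def Pre_partition_into_groups (nums : List Int) (num_groups : Int) : Prop :=
  num_groups ≠ 0 ∧ (nums = [] ∨ 0 < num_groups)
instance (nums : List Int) (num_groups : Int) : Decidable (Pre_partition_into_groups nums num_groups) := by
  unfold Pre_partition_into_groups; infer_instance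

def pvWitness_partition_into_groups : List Int × Int := ([3, 1, 2], 2)

def Spec_partition_into_groups (nums : List Int) (num_groups : Int) (out : List (List Int)) : Prop := out = partition_into_groups_alt nums num_groups
instance (nums : List Int) (num_groups : Int) (out : List (List Int)) : Decidable (Spec_partition_into_groups nums num_groups out) := by unfold Spec_partition_into_groups; infer_instance

-- ===== CLAIM (what is proved, stated in full; the proofs are below) =====
def Claim_equal_partition_into_groups : Prop := ∀ (nums : List Int) (num_groups : Int), Dom_partition_into_groups nums num_groups → Pre_partition_into_groups nums num_groups → Spec_partition_into_groups nums num_groups (partition_into_groups nums num_groups)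

-- ===== LEMMAS AND PROOFS =====

-- strict lexicographic order on the (sum, group-index) part of a heap entry, as a Prop
def ltP (p q : Int × Int × List Int) : Prop := p.1 < q.1 ∨ (p.1 = q.1 ∧ p.2.1 < q.2.1)

lemma pvLt_iff (p q : Int × Int × List Int) : pvLt p q = true ↔ ltP p q := by
  simp [pvLt, ltP]

lemma ltP_trans {p q r : Int × Int × List Int} (h1 : ltP p q) (h2 : ltP q r) : ltP p r := by
  unfold ltP at *; omega

lemma ltP_total {p q : Int × Int × List Int} (hne : p.1 ≠ q.1 ∨ p.2.1 ≠ q.2.1) :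
    ltP p q ∨ ltP q p := by
  unfold ltP; omega

-- the heap entry the invariant associates with group g
def ent (groups : List (List Int)) (sums : List Int) (g : Int) : Int × Int × List Int :=
  (PySem.List.pyGetD sums g 0, g, PySem.List.pyGetD groups g [])

def pairs (groups : List (List Int)) (sums : List Int) (k : Int) : List (Int × Int × List Int) :=
  (PySem.List.pyRange 0 k 1).map (ent groups sums)

def pvInv (k : Int) (groups : List (List Int)) (sums : List Int)
    (heap : List (Int × Int × List Int)) : Prop :=
  groups.length = k.toNat ∧ sums.length = k.toNat ∧ heap.Pairwise ltP ∧ heap.Perm (pairs groups sums k)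

-- min? is the first-minimum foldl
def pvMinStep (key : Int → Int) (acc : Option Int) (x : Int) : Option Int :=
  match acc with
  | none => some x
  | some m => if key x < key m then some x else some m

lemma min?_eq_foldl (xs : List Int) (key : Int → Int) :
    PySem.List.min? xs key = xs.foldl (pvMinStep key) none := by
  unfold PySem.List.min?
  congr 1
  funext acc x
  cases acc <;> simp [pvMinStep]

lemma foldl_min_stay (key : Int → Int) (m : Int) (l : List Int)
    (h : ∀ x ∈ l, ¬ key x < key m) : l.foldl (pvMinStep key) (some m) = some m := by
  induction l with
  | nil => rfl
  | cons x t ih =>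
    have hx : ¬ key x < key m := h x (by simp)
    simp only [List.foldl_cons, pvMinStep, if_neg hx]
    exact ih (fun y hy => h y (by simp [hy]))

lemma min?_pyRange_eq (k g : Int) (key : Int → Int)
    (h0 : 0 ≤ g) (hk : g < k)
    (hle : ∀ i, 0 ≤ i → i < k → key g ≤ key i)
    (hlt : ∀ i, 0 ≤ i → i < g → key g < key i) :
    PySem.List.min? (PySem.List.pyRange 0 k 1) key = some g := by
  rw [PySem.List.pyRange_one_append 0 g k h0 (le_of_lt hk), PySem.List.pyRange_one_cons hk]
  rw [min?_eq_foldl, List.foldl_append, List.foldl_cons]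
  have hstep : pvMinStep key ((PySem.List.pyRange 0 g 1).foldl (pvMinStep key) none) g = some g := by
    rcases hacc : (PySem.List.pyRange 0 g 1).foldl (pvMinStep key) none with _ | c
    · rfl
    · have hc : c ∈ PySem.List.pyRange 0 g 1 := by
        apply PySem.List.min?_mem (key := key)
        rw [min?_eq_foldl, hacc]
      rw [PySem.List.mem_pyRange_one] at hc
      have : key g < key c := hlt c hc.1 hc.2
      simp [pvMinStep, this]
  rw [hstep]
  apply foldl_min_stay
  intro x hx
  rw [PySem.List.mem_pyRange_one] at hx
  have := hle x (by omega) hx.2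
  omega

lemma minD_pyRange_eq (k g : Int) (key : Int → Int)
    (h0 : 0 ≤ g) (hk : g < k)
    (hle : ∀ i, 0 ≤ i → i < k → key g ≤ key i)
    (hlt : ∀ i, 0 ≤ i → i < g → key g < key i) :
    PySem.List.minD (PySem.List.pyRange 0 k 1) key 0 = g := by
  unfold PySem.List.minD
  rw [min?_pyRange_eq k g key h0 hk hle hlt]; rfl

-- binary-search boundary: on a ltP-sorted list the returned position splits it into
-- a prefix that is < item and a suffix that is not
lemma bsearch_inv (heap : List (Int × Int × List Int)) (item : Int × Int × List Int)
    (hs : heap.Pairwise ltP) (lo hi : Nat) (hlo : lo ≤ hi) (hhi : hi ≤ heap.length) :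
    lo ≤ pvBsearch heap item lo hi ∧ pvBsearch heap item lo hi ≤ hi ∧
    (∀ j (hj : j < heap.length), lo ≤ j → j < pvBsearch heap item lo hi → ltP heap[j] item) ∧
    (∀ j (hj : j < heap.length), pvBsearch heap item lo hi ≤ j → j < hi → ¬ ltP heap[j] item) := by
  rw [List.pairwise_iff_getElem] at hs
  fun_induction pvBsearch heap item lo hi with
  | case1 lo hi h mid hcond ih =>
    have hmid1 : lo ≤ mid := Nat.le_div_iff_mul_le (by omega) |>.mpr (by omega)
    have hmid2 : mid < hi := Nat.div_lt_iff_lt_mul (by omega) |>.mpr (by omega)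
    have hmlen : mid < heap.length := by omega
    have hmval : PySem.List.pyGetD heap (mid : Int) (0, 0, []) = heap[mid] := by
      rw [PySem.List.pyGetD_natCast, List.getD_eq_getElem _ _ hmlen]
    rw [hmval, pvLt_iff] at hcond
    obtain ⟨i1, i2, i3, i4⟩ := ih (by omega) hhi
    refine ⟨by omega, i2, ?_, i4⟩
    intro j hj hj0 hjr
    rcases Nat.lt_or_ge j (mid + 1) with hc | hc
    · rcases Nat.lt_or_ge j mid with hc2 | hc2
      · exact ltP_trans (hs j mid hj hmlen hc2) hcond
      · have : j = mid := by omega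
        subst this; exact hcond
    · exact i3 j hj hc hjr
  | case2 lo hi h mid hcond ih =>
    have hmid1 : lo ≤ mid := Nat.le_div_iff_mul_le (by omega) |>.mpr (by omega)
    have hmid2 : mid < hi := Nat.div_lt_iff_lt_mul (by omega) |>.mpr (by omega)
    have hmlen : mid < heap.length := by omega
    have hmval : PySem.List.pyGetD heap (mid : Int) (0, 0, []) = heap[mid] := by
      rw [PySem.List.pyGetD_natCast, List.getD_eq_getElem _ _ hmlen]
    rw [hmval] at hcond
    have hcond' : ¬ ltP heap[mid] item := by rw [← pvLt_iff]; simpa using hcond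
    obtain ⟨i1, i2, i3, i4⟩ := ih hmid1 (by omega)
    refine ⟨i1, by omega, i3, ?_⟩
    intro j hj hjr hjhi
    rcases Nat.lt_or_ge j mid with hc | hc
    · exact i4 j hj hjr hc
    · rcases Nat.lt_or_ge mid j with hc2 | hc2
      · intro hlt
        exact hcond' (ltP_trans (hs mid j hmlen hj hc2) hlt)
      · have : j = mid := by omega
        subst this; exact hcond'
  | case3 lo hi h =>
    exact ⟨le_refl _, by omega, by omega, by omega⟩

lemma bsearch_spec (heap : List (Int × Int × List Int)) (item : Int × Int × List Int)
    (hs : heap.Pairwise ltP) :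
    pvBsearch heap item 0 heap.length ≤ heap.length ∧
    (∀ j (hj : j < heap.length), j < pvBsearch heap item 0 heap.length → ltP heap[j] item) ∧
    (∀ j (hj : j < heap.length), pvBsearch heap item 0 heap.length ≤ j → ¬ ltP heap[j] item) := by
  obtain ⟨i1, i2, i3, i4⟩ := bsearch_inv heap item hs 0 heap.length (Nat.zero_le _) (le_refl _)
  exact ⟨i2, fun j hj hjr => i3 j hj (Nat.zero_le _) hjr, fun j hj hjr => i4 j hj hjr hj⟩

-- inserting at the bsearch position keeps the heap sorted (entries' (sum, g) keys all differ from item's)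
lemma insert_pairwise (rest : List (Int × Int × List Int)) (item : Int × Int × List Int)
    (hs : rest.Pairwise ltP)
    (hne : ∀ x ∈ rest, x.1 ≠ item.1 ∨ x.2.1 ≠ item.2.1) :
    (rest.take (pvBsearch rest item 0 rest.length) ++ item :: rest.drop (pvBsearch rest item 0 rest.length)).Pairwise ltP := by
  obtain ⟨i1, i2, i3⟩ := bsearch_spec rest item hs
  set pos := pvBsearch rest item 0 rest.length with hpos
  have hgetElem := List.pairwise_iff_getElem.mp hs
  have htake : ∀ x ∈ rest.take pos, ∃ j, ∃ hj : j < rest.length, j < pos ∧ rest[j] = x := by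
    intro x hx
    obtain ⟨i, hi, hix⟩ := List.mem_iff_getElem.mp hx
    have hi' : i < pos ∧ i < rest.length := by
      have := List.length_take (i := pos) (l := rest); omega
    exact ⟨i, hi'.2, hi'.1, by rw [← hix, List.getElem_take]⟩
  have hdrop : ∀ y ∈ rest.drop pos, ∃ j, ∃ hj : j < rest.length, pos ≤ j ∧ rest[j] = y := by
    intro y hy
    obtain ⟨i, hi, hiy⟩ := List.mem_iff_getElem.mp hy
    have hi' : pos + i < rest.length := by
      have := List.length_drop (i := pos) (l := rest); omega
    exact ⟨pos + i, hi', by omega, by rw [← hiy, List.getElem_drop]⟩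
  rw [List.pairwise_append]
  refine ⟨hs.sublist (List.take_sublist _ _), ?_, ?_⟩
  · rw [List.pairwise_cons]
    refine ⟨?_, hs.sublist (List.drop_sublist _ _)⟩
    intro y hy
    obtain ⟨j, hj, hjp, rfl⟩ := hdrop y hy
    have hnlt := i3 j hj hjp
    have := hne _ (List.getElem_mem hj)
    rcases ltP_total this with h | h
    · exact absurd h hnlt
    · exact h
  · intro x hx y hy
    obtain ⟨j, hj, hjp, rfl⟩ := htake x hx
    rcases List.mem_cons.mp hy with rfl | hy'
    · exact i2 j hj hjp
    · obtain ⟨j', hj', hjp', rfl⟩ := hdrop y hy'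
      exact hgetElem j j' hj hj' (by omega)

lemma pairs_split (groups : List (List Int)) (sums : List Int) (k g : Int)
    (h0 : 0 ≤ g) (hk : g < k) :
    pairs groups sums k = (PySem.List.pyRange 0 g 1).map (ent groups sums)
      ++ ent groups sums g :: (PySem.List.pyRange (g+1) k 1).map (ent groups sums) := by
  unfold pairs
  rw [PySem.List.pyRange_one_append 0 g k h0 (le_of_lt hk), PySem.List.pyRange_one_cons hk]
  simp

lemma inv_init (k : Int) :
    pvInv k ((PySem.List.pyRange 0 k 1).map (fun _ => ([] : List Int)))
        (PySem.List.pyRepeat [(0 : Int)] k)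
        ((PySem.List.pyRange 0 k 1).map (fun g => ((0 : Int), g, ([] : List Int)))) := by
  refine ⟨?_, ?_, ?_, ?_⟩
  · simp [PySem.List.length_pyRange_one]
  · simp [PySem.List.pyRepeat_singleton]
  · exact (PySem.List.pairwise_lt_pyRange_one 0 k).map _ (fun a b hab => Or.inr ⟨rfl, hab⟩)
  · have : pairs ((PySem.List.pyRange 0 k 1).map (fun _ => ([] : List Int)))
        (PySem.List.pyRepeat [(0 : Int)] k) k
        = (PySem.List.pyRange 0 k 1).map (fun g => ((0 : Int), g, ([] : List Int))) := by
      unfold pairs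
      apply List.map_congr_left
      intro g hg
      rw [PySem.List.mem_pyRange_one] at hg
      unfold ent
      congr 1
      · rw [PySem.List.pyRepeat_singleton]
        rw [PySem.List.pyGetD_eq_getElem _ _ hg.1 (by simp; omega)]
        simp
      · congr 1
        rw [PySem.List.pyGetD_map_pyRange_of_nonneg _ _ _ _ hg.1 hg.2]
    rw [this]

lemma inv_step (nums : List Int) (k : Int) (hk : 0 < k)
    (groups : List (List Int)) (sums : List Int) (heap : List (Int × Int × List Int))
    (hInv : pvInv k groups sums heap) (index : Int) :
    pvInv k (pvStepA nums k (groups, sums) index).1 (pvStepA nums k (groups, sums) index).2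
        (pvStepB nums heap index) := by
  obtain ⟨hlg, hls, hpw, hperm⟩ := hInv
  cases heap with
  | nil =>
    exfalso
    have := hperm.length_eq
    simp [pairs, PySem.List.length_pyRange_one] at this
    omega
  | cons h t =>
    -- the head of the heap is the entry of some group g
    have hmem : h ∈ pairs groups sums k := hperm.mem_iff.mp (by simp)
    obtain ⟨g, hgmem, hent⟩ := List.mem_map.mp hmem
    rw [PySem.List.mem_pyRange_one] at hgmem
    obtain ⟨hg0, hgk⟩ := hgmem
    have hpwt : t.Pairwise ltP := (List.pairwise_cons.mp hpw).2
    have hhlt : ∀ x ∈ t, ltP h x := (List.pairwise_cons.mp hpw).1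
    -- every other group's entry sits in the tail, hence is ltP-greater than h
    have hothers : ∀ i, 0 ≤ i → i < k → i ≠ g → ltP h (ent groups sums i) := by
      intro i h0 h1 h2
      have hmemi : ent groups sums i ∈ pairs groups sums k :=
        List.mem_map_of_mem (by rw [PySem.List.mem_pyRange_one]; exact ⟨h0, h1⟩)
      have : ent groups sums i ∈ h :: t := hperm.mem_iff.mpr hmemi
      rcases List.mem_cons.mp this with heq | hmt
      · exfalso
        have : i = g := by
          have := congrArg (fun p => p.2.1) (heq.trans hent.symm)
          simpa [ent] using this
        exact h2 this
      · exact hhlt _ hmt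
    -- A picks exactly g
    have hcg : PySem.List.minD (PySem.List.pyRange 0 k 1)
        (fun i => PySem.List.pyGetD sums i 0) 0 = g := by
      apply minD_pyRange_eq k g _ hg0 hgk
      · intro i h0 h1
        by_cases hig : i = g
        · subst hig; exact le_refl _
        · have := hothers i h0 h1 hig
          rw [← hent] at this
          unfold ltP ent at this
          simp only at this
          omega
      · intro i h0 h1
        have := hothers i h0 (by omega) (by omega)
        rw [← hent] at this
        unfold ltP ent at this
        simp only at this
        omega
    -- abbreviations for the updated state
    have hgN : g = ((g.toNat : Nat) : Int) := (Int.toNat_of_nonneg hg0).symm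
    subst hent
    simp only [pvStepA, pvStepB, ent, hcg]
    set v := PySem.List.pyGetD nums index 0 with hv
    set groups' := PySem.List.pySetD groups g (PySem.List.pyGetD groups g [] ++ [index]) with hG
    set sums' := PySem.List.pySetD sums g (PySem.List.pyGetD sums g 0 + v) with hS
    set item : Int × Int × List Int :=
      (PySem.List.pyGetD sums g 0 + v, g, PySem.List.pyGetD groups g [] ++ [index]) with hitem
    -- updated entries agree with the old ones away from g, and item is the new g-entry
    have hent_ne : ∀ i, 0 ≤ i → i ≠ g → ent groups' sums' i = ent groups sums i := by
      intro i h0 hne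
      have hiN : i = ((i.toNat : Nat) : Int) := (Int.toNat_of_nonneg h0).symm
      unfold ent
      rw [hG, hS, hgN, hiN,
        PySem.List.pyGetD_pySetD_natCast _ _ _ _ _ (by omega),
        PySem.List.pyGetD_pySetD_natCast _ _ _ _ _ (by omega)]
      have : ¬ (i.toNat = g.toNat) := by omega
      simp [this, Int.toNat_of_nonneg h0]
    have hent_self : ent groups' sums' g = item := by
      unfold ent
      rw [hG, hS, hgN,
        PySem.List.pyGetD_pySetD_natCast _ _ _ _ _ (by omega),
        PySem.List.pyGetD_pySetD_natCast _ _ _ _ _ (by omega)]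
      simp [hitem, Int.toNat_of_nonneg hg0]
    -- split the old and new pairs lists at g
    have hsplit := pairs_split groups sums k g hg0 hgk
    have hsplit' := pairs_split groups' sums' k g hg0 hgk
    have hA : (PySem.List.pyRange 0 g 1).map (ent groups' sums')
        = (PySem.List.pyRange 0 g 1).map (ent groups sums) := by
      apply List.map_congr_left
      intro i hi; rw [PySem.List.mem_pyRange_one] at hi
      exact hent_ne i hi.1 (by omega)
    have hB : (PySem.List.pyRange (g+1) k 1).map (ent groups' sums')
        = (PySem.List.pyRange (g+1) k 1).map (ent groups sums) := by
      apply List.map_congr_left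
      intro i hi; rw [PySem.List.mem_pyRange_one] at hi
      exact hent_ne i (by omega) (by omega)
    -- the tail is a permutation of the non-g entries
    have htperm : t.Perm ((PySem.List.pyRange 0 g 1).map (ent groups sums)
        ++ (PySem.List.pyRange (g+1) k 1).map (ent groups sums)) := by
      have h1 : (((PySem.List.pyGetD sums g 0, g, PySem.List.pyGetD groups g []) : Int × Int × List Int) :: t).Perm
          ((PySem.List.pyRange 0 g 1).map (ent groups sums)
            ++ ent groups sums g :: (PySem.List.pyRange (g+1) k 1).map (ent groups sums)) := by
        rw [← hsplit]; exact hperm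
      have h2 := h1.trans List.perm_middle
      have h3 : ent groups sums g = (PySem.List.pyGetD sums g 0, g, PySem.List.pyGetD groups g []) := rfl
      rw [h3] at h2
      exact h2.cons_inv
    -- every tail entry has a different (sum, group) key than item
    have hne_item : ∀ x ∈ t, x.1 ≠ item.1 ∨ x.2.1 ≠ item.2.1 := by
      intro x hx
      have : x ∈ (PySem.List.pyRange 0 g 1).map (ent groups sums)
          ++ (PySem.List.pyRange (g+1) k 1).map (ent groups sums) := htperm.mem_iff.mp hx
      rcases List.mem_append.mp this with hxm | hxm <;>
      · obtain ⟨i, hi, rfl⟩ := List.mem_map.mp hxm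
        rw [PySem.List.mem_pyRange_one] at hi
        right
        simp only [ent, hitem]
        omega
    obtain ⟨b1, b2, b3⟩ := bsearch_spec t item hpwt
    have hins : PySem.List.insert t ((pvBsearch t item 0 t.length : Nat) : Int) item
        = t.take (pvBsearch t item 0 t.length) ++ item :: t.drop (pvBsearch t item 0 t.length) :=
      PySem.List.insert_natCast t _ item b1
    refine ⟨?_, ?_, ?_, ?_⟩
    · simpa [hG] using hlg
    · simpa [hS] using hls
    · rw [hins]; exact insert_pairwise t item hpwt hne_item
    · rw [hins, hsplit', hA, hB, hent_self]
      refine List.Perm.trans ?_ List.perm_middle.symm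
      have : (t.take (pvBsearch t item 0 t.length) ++ item :: t.drop (pvBsearch t item 0 t.length)).Perm
          (item :: t) := by
        refine List.Perm.trans List.perm_middle ?_
        rw [List.take_append_drop]
      exact this.trans (htperm.cons item)

lemma inv_loop (nums : List Int) (k : Int) (hk : 0 < k) (order : List Int)
    (groups : List (List Int)) (sums : List Int) (heap : List (Int × Int × List Int))
    (hInv : pvInv k groups sums heap) :
    pvInv k (order.foldl (pvStepA nums k) (groups, sums)).1
        (order.foldl (pvStepA nums k) (groups, sums)).2
        (order.foldl (pvStepB nums) heap) := by
  induction order generalizing groups sums heap with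
  | nil => exact hInv
  | cons index rest ih =>
    have h := inv_step nums k hk groups sums heap hInv index
    simpa using ih _ _ _ h

lemma inv_final (k : Int) (hk : 0 ≤ k)
    (groups : List (List Int)) (sums : List Int) (heap : List (Int × Int × List Int))
    (hInv : pvInv k groups sums heap) :
    (PySem.List.sorted heap (fun t => t.2.1) false).map (fun t => t.2.2) = groups := by
  obtain ⟨hg, hsu, hpw, hperm⟩ := hInv
  have hpp : (pairs groups sums k).Pairwise (fun a b => a.2.1 < b.2.1) :=
    (PySem.List.pairwise_lt_pyRange_one 0 k).map _ (fun a b hab => by simpa [ent] using hab)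
  rw [PySem.List.sorted_eq_of_perm_of_pairwise_lt heap (pairs groups sums k) _ hperm.symm hpp]
  unfold pairs
  rw [List.map_map]
  have hc : ((fun t : Int × Int × List Int => t.2.2) ∘ ent groups sums)
      = fun j => PySem.List.pyGetD groups j [] := by
    funext j; rfl
  rw [hc]
  have hk' : ((groups.length : Int)) = k := by omega
  rw [← hk']
  exact PySem.List.map_pyGetD_pyRange_zero' groups []

-- ===== VERDICT (by name: the statement is the Claim_ definition above) =====
theorem partition_into_groups_spec : Claim_equal_partition_into_groups := by
  intro nums k _hdom hpre
  show partition_into_groups nums k = partition_into_groups_alt nums k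
  unfold partition_into_groups partition_into_groups_alt
  dsimp only
  by_cases hk : 0 < k
  · exact (inv_final k hk.le _ _ _
      (inv_loop nums k hk
        (PySem.List.sorted (PySem.List.pyRange 0 (nums.length : Int) 1)
          (fun i => PySem.List.pyGetD nums i 0) true)
        _ _ _ (inv_init k))).symm
  · obtain ⟨hk0, hcase⟩ := hpre
    have hnil : nums = [] := by
      rcases hcase with h | h
      · exact h
      · exact absurd h hk
    subst hnil
    have h1 : PySem.List.pyRange 0 ((([] : List Int).length : Int)) 1 = [] :=
      PySem.List.pyRange_one_eq_nil (by simp)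
    have h2 : PySem.List.pyRange 0 k 1 = [] := PySem.List.pyRange_one_eq_nil (by omega)
    rw [h1, h2]
    have h3 : PySem.List.sorted ([] : List Int) (fun i => PySem.List.pyGetD ([] : List Int) i 0) true = [] :=
      (PySem.List.sorted_eq_nil_iff _ _ _).mpr rfl
    rw [h3]
    simp [(PySem.List.sorted_eq_nil_iff _ _ _).mpr]
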